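-- pv_equiv track=rewrite | github.com/Icln/Algorithm | 프로그래머스/2/258711. 도넛과 막대 그래프/도넛과 막대 그래프.py | solution
-- ===== SOURCE A (Python) =====
-- from collections import defaultdict
--
-- def solution(edges):
--     start, end = defaultdict(int), defaultdict(int)
--     for edge in edges:
--         start[edge[0]] += 1
--         end[edge[1]] += 1
--
--     v, d, s, e = 0, 0, 0, 0
--     last = max(max(start), max(end)) + 1
--     for i in range(1, last):
--         if start[i] == 0:
--             s += 1
--             continue
--         if start[i] >= 2 and end[i] >= 2:
--             e += 1
--             continue
--         if start[i] >= 2 and end[i] == 0: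
--             v = i
--             continue
--
--     d = start[v] - (s + e)
--     return [v, d, s, e]
-- ===== SOURCE B (Python) =====
-- def solution(edges):
--     # Aggregate over the degree dictionaries instead of scanning range(1, last).
--     start, end = {}, {}
--     for edge in edges:
--         a, b = edge[0], edge[1]
--         start[a] = start.get(a, 0) + 1
--         end[b] = end.get(b, 0) + 1
--
--     last = max(max(start), max(end)) + 1
--     n = max(last - 1, 0)                      # ids considered: 1 .. last-1
--     s = n - sum(1 for k in start if k >= 1)   # ids with out-degree 0 are sticks
--     e = sum(1 for k, c in start.items()
--             if k >= 1 and c >= 2 and end.get(k, 0) >= 2)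
--     v = max((k for k, c in start.items()
--              if k >= 1 and c >= 2 and end.get(k, 0) == 0), default=0)
--     d = start.get(v, 0) - (s + e)
--     return [v, d, s, e]
-- ===== Notes on version B (the rewrite author's own statement) =====
-- stated objective: alternative
-- what changed: B drops A's scan over range(1, max_id+1) and instead computes the stick count by arithmetic on the number of positive out-degree keys and the e/root aggregates by a single pass over the out-degree dictionary's items (root = max qualifying key, matching A's ascending overwrite).
import Mathlib
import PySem

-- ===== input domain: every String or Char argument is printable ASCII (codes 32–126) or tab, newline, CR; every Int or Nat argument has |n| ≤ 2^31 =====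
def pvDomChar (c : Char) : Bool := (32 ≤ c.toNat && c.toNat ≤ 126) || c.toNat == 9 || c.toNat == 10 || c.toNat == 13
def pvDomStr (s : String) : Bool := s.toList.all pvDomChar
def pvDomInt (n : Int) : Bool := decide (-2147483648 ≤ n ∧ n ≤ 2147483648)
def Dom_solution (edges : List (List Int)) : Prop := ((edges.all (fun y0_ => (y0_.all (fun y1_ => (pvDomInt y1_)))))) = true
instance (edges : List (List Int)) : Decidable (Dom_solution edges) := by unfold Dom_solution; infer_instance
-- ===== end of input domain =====

-- B replaces A's scan over range(1, max_id+1) by direct aggregation (counts / max) over the degree dictionaries.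

-- ===== PORT A =====
-- edge[0] / edge[1] are ported with pyGetD (default 0): exact on Pre_ (every edge has length ≥ 2,
-- exactly where the Python indexing does not raise).
def solution (edges : List (List Int)) : List Int :=
  let p := edges.foldl
    (fun (sd : PySem.Dict Int Int × PySem.Dict Int Int) edge =>
      (PySem.Dict.modify sd.1 (PySem.List.pyGetD edge 0 0) 0 (fun t => t + 1),
       PySem.Dict.modify sd.2 (PySem.List.pyGetD edge 1 0) 0 (fun t => t + 1)))
    (PySem.Dict.empty, PySem.Dict.empty)
  match PySem.List.max? p.1.keys (fun k => k), PySem.List.max? p.2.keys (fun k => k) with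
  | some ms, some me =>
      let last := max ms me + 1
      let st := (PySem.List.pyRange 1 last 1).foldl
        (fun (vse : Int × Int × Int) i =>
          if PySem.Dict.getD p.1 i 0 = 0 then (vse.1, vse.2.1 + 1, vse.2.2)
          else if 2 ≤ PySem.Dict.getD p.1 i 0 ∧ 2 ≤ PySem.Dict.getD p.2 i 0 then
            (vse.1, vse.2.1, vse.2.2 + 1)
          else if 2 ≤ PySem.Dict.getD p.1 i 0 ∧ PySem.Dict.getD p.2 i 0 = 0 then
            (i, vse.2.1, vse.2.2)
          else vse)
        (0, 0, 0)
      [st.1, PySem.Dict.getD p.1 st.1 0 - (st.2.1 + st.2.2), st.2.1, st.2.2]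
  | _, _ => []   -- unreachable under Pre_ (edges ≠ [] makes both dicts nonempty; Python's max() raises there)

-- ===== PORT B =====
def solution_alt (edges : List (List Int)) : List Int :=
  let p := edges.foldl
    (fun (sd : PySem.Dict Int Int × PySem.Dict Int Int) edge =>
      (PySem.Dict.insert sd.1 (PySem.List.pyGetD edge 0 0) (PySem.Dict.getD sd.1 (PySem.List.pyGetD edge 0 0) 0 + 1),
       PySem.Dict.insert sd.2 (PySem.List.pyGetD edge 1 0) (PySem.Dict.getD sd.2 (PySem.List.pyGetD edge 1 0) 0 + 1)))
    (PySem.Dict.empty, PySem.Dict.empty)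
  match PySem.List.max? p.1.keys (fun k => k) with
  | none => []   -- unreachable under Pre_ (Python's max() raises on an empty dict)
  | some ms =>
    match PySem.List.max? p.2.keys (fun k => k) with
    | none => []
    | some me =>
      let last := max ms me + 1
      let n := max (last - 1) 0
      let s := n - (p.1.keys.countP (fun k => decide (1 ≤ k)) : Int)
      let e := ((p.1.items.countP (fun kc => decide (1 ≤ kc.1 ∧ 2 ≤ kc.2 ∧ 2 ≤ PySem.Dict.getD p.2 kc.1 0))) : Int)
      let v := PySem.List.maxD
        ((p.1.items.filter (fun kc => decide (1 ≤ kc.1 ∧ 2 ≤ kc.2 ∧ PySem.Dict.getD p.2 kc.1 0 = 0))).map (fun kc => kc.1))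
        (fun k => k) 0
      [v, PySem.Dict.getD p.1 v 0 - (s + e), s, e]

-- ===== PRECONDITION & SPEC =====
-- Pre_ is exactly where the Python A returns: a nonempty edge list (max() raises ValueError on an
-- empty dict) whose edges all have length ≥ 2 (edge[0]/edge[1] raise IndexError otherwise).
def Pre_solution (edges : List (List Int)) : Prop :=
  edges ≠ [] ∧ ∀ e ∈ edges, 2 ≤ e.length
instance (edges : List (List Int)) : Decidable (Pre_solution edges) := by unfold Pre_solution; infer_instance
def pvWitness_solution : List (List Int) := [[1, 2]]

def Spec_solution (edges : List (List Int)) (out : List Int) : Prop := out = solution_alt edges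
instance (edges : List (List Int)) (out : List Int) : Decidable (Spec_solution edges out) := by unfold Spec_solution; infer_instance

-- ===== CLAIM (what is proved, stated in full; the proofs are below) =====
def Claim_equal_solution : Prop := ∀ (edges : List (List Int)), Dom_solution edges → Pre_solution edges → Spec_solution edges (solution edges)

-- ===== LEMMAS AND PROOFS =====

-- two nodup lists whose members satisfying the respective predicates coincide have filters of equal length
lemma pv_filter_len_eq {l1 l2 : List Int} {p q : Int → Bool}
    (h1 : l1.Nodup) (h2 : l2.Nodup)
    (h : ∀ x, (x ∈ l1 ∧ p x) ↔ (x ∈ l2 ∧ q x)) :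
    (l1.filter p).length = (l2.filter q).length := by
  have hp : (l1.filter p).Perm (l2.filter q) := by
    rw [List.perm_ext_iff_of_nodup (h1.filter p) (h2.filter q)]
    intro x
    simp only [List.mem_filter]
    exact h x
  exact hp.length_eq

lemma pv_countP_congr {l1 l2 : List Int} {p q : Int → Bool}
    (h1 : l1.Nodup) (h2 : l2.Nodup)
    (h : ∀ x, (x ∈ l1 ∧ p x) ↔ (x ∈ l2 ∧ q x)) :
    l1.countP p = l2.countP q := by
  rw [List.countP_eq_length_filter, List.countP_eq_length_filter]
  exact pv_filter_len_eq h1 h2 h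

lemma pv_countP_not (l : List Int) (p : Int → Bool) :
    l.countP p + l.countP (fun x => !p x) = l.length := by
  induction l with
  | nil => rfl
  | cons x t ih => by_cases h : p x <;> simp [h] <;> omega

-- 'v = i on hits' fold returns the last hit
lemma pv_foldl_keep_if (p : Int → Prop) [DecidablePred p] (l : List Int) (a : Int) :
    l.foldl (fun v i => if p i then i else v) a = (l.filter (fun i => decide (p i))).getLastD a := by
  induction l generalizing a with
  | nil => rfl
  | cons x t ih =>
      by_cases hx : p x
      · rw [List.foldl_cons, if_pos hx, ih, List.filter_cons, if_pos (by simp [hx]),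
          List.getLastD_cons]
      · rw [List.foldl_cons, if_neg hx, ih, List.filter_cons, if_neg (by simp [hx])]

-- in an ascending list every element is ≤ the last
lemma pv_le_getLastD {l : List Int} (hl : l.Pairwise (· < ·)) {y : Int} (hy : y ∈ l) (a : Int) :
    y ≤ l.getLastD a := by
  induction l generalizing a with
  | nil => cases hy
  | cons x t ih =>
      rw [List.getLastD_cons]
      rcases List.mem_cons.mp hy with rfl | hyt
      · rcases List.mem_cons.mp (List.getLastD_mem_cons (l := t) (a := y)) with h | h
        · rw [h]
        · exact le_of_lt (List.rel_of_pairwise_cons hl h)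
      · exact ih hl.of_cons hyt x

-- the last hit of an ascending scan is the maximum of the hit set
lemma pv_getLastD_eq_maxD {l1 l2 : List Int}
    (hsorted : l1.Pairwise (· < ·))
    (hmem : ∀ x, x ∈ l1 ↔ x ∈ l2) :
    l1.getLastD 0 = PySem.List.maxD l2 (fun k => k) 0 := by
  cases hmax : PySem.List.max? l2 (fun k => k) with
  | none =>
      have hl2 : l2 = [] := (PySem.List.max?_eq_none_iff _ _).mp hmax
      have hl1 : l1 = [] := by
        cases l1 with
        | nil => rfl
        | cons a t =>
            exact absurd ((hmem a).mp (List.mem_cons_self)) (by simp [hl2])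
      simp [hl1, PySem.List.maxD, hmax]
  | some m =>
      have hm1 : m ∈ l1 := (hmem m).mpr (PySem.List.max?_mem hmax)
      obtain ⟨a, t, rfl⟩ := List.exists_cons_of_ne_nil (List.ne_nil_of_mem hm1)

      have hL : (a :: t).getLastD 0 ∈ a :: t := by
        rw [List.getLastD_cons]
        exact List.getLastD_mem_cons
      have hle1 : (a :: t).getLastD 0 ≤ m :=
        PySem.List.max?_isMax hmax _ ((hmem _).mp hL)
      have hle2 : m ≤ (a :: t).getLastD 0 := pv_le_getLastD hsorted hm1 0
      simp only [PySem.List.maxD, hmax, Option.getD_some]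
      omega

-- A's triple-accumulator loop splits into three independent scans
lemma pv_loop_split (cS cE : Int → Int) (L : List Int) :
    L.foldl
      (fun (vse : Int × Int × Int) i =>
        if cS i = 0 then (vse.1, vse.2.1 + 1, vse.2.2)
        else if 2 ≤ cS i ∧ 2 ≤ cE i then (vse.1, vse.2.1, vse.2.2 + 1)
        else if 2 ≤ cS i ∧ cE i = 0 then (i, vse.2.1, vse.2.2)
        else vse) (0, 0, 0)
    = (L.foldl (fun v i => if 2 ≤ cS i ∧ cE i = 0 then i else v) 0,
       (L.countP (fun i => decide (cS i = 0)) : Int),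
       (L.countP (fun i => decide (2 ≤ cS i ∧ 2 ≤ cE i)) : Int)) := by
  have hstep : (fun (vse : Int × Int × Int) i =>
        if cS i = 0 then (vse.1, vse.2.1 + 1, vse.2.2)
        else if 2 ≤ cS i ∧ 2 ≤ cE i then (vse.1, vse.2.1, vse.2.2 + 1)
        else if 2 ≤ cS i ∧ cE i = 0 then (i, vse.2.1, vse.2.2)
        else vse)
      = (fun (vse : Int × Int × Int) i =>
          ((fun v i => if 2 ≤ cS i ∧ cE i = 0 then i else v) vse.1 i,
           (fun (se : Int × Int) i =>
              ((fun s i => if cS i = 0 then s + 1 else s) se.1 i,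
               (fun e i => if 2 ≤ cS i ∧ 2 ≤ cE i then e + 1 else e) se.2 i)) vse.2 i)) := by
    funext vse i
    obtain ⟨v, s, e⟩ := vse
    dsimp only
    split_ifs <;> simp_all
  rw [hstep,
    PySem.List.foldl_prod_mk
      (f := fun v i => if 2 ≤ cS i ∧ cE i = 0 then i else v)
      (g := fun (se : Int × Int) i =>
        ((fun s i => if cS i = 0 then s + 1 else s) se.1 i,
         (fun e i => if 2 ≤ cS i ∧ 2 ≤ cE i then e + 1 else e) se.2 i)),
    PySem.List.foldl_prod_mk
      (f := fun s i => if cS i = 0 then s + 1 else s)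
      (g := fun e i => if 2 ≤ cS i ∧ 2 ≤ cE i then e + 1 else e),
    PySem.List.foldl_ite_add_one, PySem.List.foldl_ite_add_one]
  simp

-- ===== VERDICT (by name: the statement is the Claim_ definition above) =====
theorem solution_spec : Claim_equal_solution := by
  intro edges _ hpre
  obtain ⟨hne, _⟩ := hpre
  show solution edges = solution_alt edges
  -- the degree dictionaries of both ports are the counters of the endpoint lists
  set ks := edges.map (fun e => PySem.List.pyGetD e 0 0) with hksdef
  set ls := edges.map (fun e => PySem.List.pyGetD e 1 0) with hlsdef
  have hA : edges.foldl
      (fun (sd : PySem.Dict Int Int × PySem.Dict Int Int) edge =>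
        (PySem.Dict.modify sd.1 (PySem.List.pyGetD edge 0 0) 0 (fun t => t + 1),
         PySem.Dict.modify sd.2 (PySem.List.pyGetD edge 1 0) 0 (fun t => t + 1)))
      (PySem.Dict.empty, PySem.Dict.empty)
      = (PySem.Dict.counter ks, PySem.Dict.counter ls) := by
    rw [PySem.List.foldl_prod_mk
      (f := fun (d : PySem.Dict Int Int) (edge : List Int) =>
        PySem.Dict.modify d (PySem.List.pyGetD edge 0 0) 0 (fun t => t + 1))
      (g := fun (d : PySem.Dict Int Int) (edge : List Int) =>
        PySem.Dict.modify d (PySem.List.pyGetD edge 1 0) 0 (fun t => t + 1))]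
    rw [PySem.Dict.counter_eq_foldl, PySem.Dict.counter_eq_foldl, hksdef, hlsdef,
      List.foldl_map, List.foldl_map]
  have hB : edges.foldl
      (fun (sd : PySem.Dict Int Int × PySem.Dict Int Int) edge =>
        (PySem.Dict.insert sd.1 (PySem.List.pyGetD edge 0 0) (PySem.Dict.getD sd.1 (PySem.List.pyGetD edge 0 0) 0 + 1),
         PySem.Dict.insert sd.2 (PySem.List.pyGetD edge 1 0) (PySem.Dict.getD sd.2 (PySem.List.pyGetD edge 1 0) 0 + 1)))
      (PySem.Dict.empty, PySem.Dict.empty)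
      = (PySem.Dict.counter ks, PySem.Dict.counter ls) := by
    rw [PySem.List.foldl_prod_mk
      (f := fun (d : PySem.Dict Int Int) (edge : List Int) =>
        PySem.Dict.insert d (PySem.List.pyGetD edge 0 0) (PySem.Dict.getD d (PySem.List.pyGetD edge 0 0) 0 + 1))
      (g := fun (d : PySem.Dict Int Int) (edge : List Int) =>
        PySem.Dict.insert d (PySem.List.pyGetD edge 1 0) (PySem.Dict.getD d (PySem.List.pyGetD edge 1 0) 0 + 1))]
    rw [← PySem.Dict.foldl_insert_getD_add_one_eq_counter,
      ← PySem.Dict.foldl_insert_getD_add_one_eq_counter, hksdef, hlsdef,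
      List.foldl_map, List.foldl_map]
  simp only [solution, solution_alt, hA, hB]
  have hksne : ks ≠ [] := by simpa [hksdef, List.map_eq_nil_iff] using hne
  have hlsne : ls ≠ [] := by simpa [hlsdef, List.map_eq_nil_iff] using hne
  obtain ⟨ms, hms⟩ : ∃ m, PySem.List.max? (PySem.Dict.counter ks).keys (fun k => k) = some m := by
    cases h : PySem.List.max? (PySem.Dict.counter ks).keys (fun k => k) with
    | none =>
        rw [PySem.List.max?_eq_none_iff, PySem.Dict.keys_counter] at h
        cases hk : ks with
        | nil => exact absurd hk hksne
        | cons a t => rw [hk, PySem.Set.ofList_cons] at h; cases h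
    | some m => exact ⟨m, rfl⟩
  obtain ⟨me, hme⟩ : ∃ m, PySem.List.max? (PySem.Dict.counter ls).keys (fun k => k) = some m := by
    cases h : PySem.List.max? (PySem.Dict.counter ls).keys (fun k => k) with
    | none =>
        rw [PySem.List.max?_eq_none_iff, PySem.Dict.keys_counter] at h
        cases hk : ls with
        | nil => exact absurd hk hlsne
        | cons a t => rw [hk, PySem.Set.ofList_cons] at h; cases h
    | some m => exact ⟨m, rfl⟩
  rw [hms, hme]
  dsimp only
  rw [pv_loop_split (fun i => (PySem.Dict.counter ks).getD i 0) (fun i => (PySem.Dict.counter ls).getD i 0)]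
  dsimp only
  rw [pv_foldl_keep_if (fun i => 2 ≤ (PySem.Dict.counter ks).getD i 0 ∧ (PySem.Dict.counter ls).getD i 0 = 0)]
  rw [PySem.Dict.keys_counter, PySem.Dict.items_counter, List.countP_map, List.filter_map, List.map_map]
  simp only [Function.comp_def, PySem.Dict.getD_counter, List.map_id']
  have hmsK := hms
  rw [PySem.Dict.keys_counter] at hmsK
  have hub : ∀ x ∈ ks, x < max ms me + 1 := by
    intro x hx
    have h1 := PySem.List.max?_isMax hmsK x ((PySem.Set.mem_ofList ks x).mpr hx)
    have h2 := le_max_left ms me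
    omega
  have hv :
      (List.filter (fun i => decide (2 ≤ (List.count i ks : Int) ∧ (List.count i ls : Int) = 0))
        (PySem.List.pyRange 1 (max ms me + 1))).getLastD 0
      = PySem.List.maxD
          (List.filter (fun k => decide (1 ≤ k ∧ 2 ≤ (List.count k ks : Int) ∧ (List.count k ls : Int) = 0))
            (PySem.Set.ofList ks)) (fun k => k) 0 := by
    apply pv_getLastD_eq_maxD
      ((PySem.List.pairwise_lt_pyRange_one 1 (max ms me + 1)).filter _)
    intro x
    simp only [List.mem_filter, PySem.List.mem_pyRange_one, PySem.Set.mem_ofList,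
      decide_eq_true_eq]
    constructor
    · rintro ⟨⟨hx1, _⟩, h2, h3⟩
      have hxks : x ∈ ks := List.count_pos_iff.mp (by omega)
      exact ⟨hxks, hx1, h2, h3⟩
    · rintro ⟨hxks, h1, h2, h3⟩
      exact ⟨⟨h1, hub x hxks⟩, h2, h3⟩
  have he :
      List.countP (fun i => decide (2 ≤ (List.count i ks : Int) ∧ 2 ≤ (List.count i ls : Int)))
        (PySem.List.pyRange 1 (max ms me + 1))
      = List.countP (fun k => decide (1 ≤ k ∧ 2 ≤ (List.count k ks : Int) ∧ 2 ≤ (List.count k ls : Int)))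
          (PySem.Set.ofList ks) := by
    apply pv_countP_congr (PySem.List.nodup_pyRange_one 1 (max ms me + 1)) (PySem.Set.nodup_ofList ks)
    intro x
    simp only [PySem.List.mem_pyRange_one, PySem.Set.mem_ofList, decide_eq_true_eq]
    constructor
    · rintro ⟨⟨hx1, _⟩, h2, h3⟩
      have hxks : x ∈ ks := List.count_pos_iff.mp (by omega)
      exact ⟨hxks, hx1, h2, h3⟩
    · rintro ⟨hxks, h1, h2, h3⟩
      exact ⟨⟨h1, hub x hxks⟩, h2, h3⟩
  have hsc :
      List.countP (fun i => !(decide ((List.count i ks : Int) = 0)))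
        (PySem.List.pyRange 1 (max ms me + 1))
      = List.countP (fun k => decide (1 ≤ k)) (PySem.Set.ofList ks) := by
    apply pv_countP_congr (PySem.List.nodup_pyRange_one 1 (max ms me + 1)) (PySem.Set.nodup_ofList ks)
    intro x
    simp only [PySem.List.mem_pyRange_one, PySem.Set.mem_ofList, decide_eq_true_eq,
      Bool.not_eq_true', decide_eq_false_iff_not]
    constructor
    · rintro ⟨⟨hx1, _⟩, h2⟩
      have hxks : x ∈ ks := List.count_pos_iff.mp (by omega)
      exact ⟨hxks, hx1⟩
    · rintro ⟨hxks, h1⟩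
      have := List.count_pos_iff.mpr hxks
      exact ⟨⟨h1, hub x hxks⟩, by omega⟩
  have hs :
      (List.countP (fun i => decide ((List.count i ks : Int) = 0))
        (PySem.List.pyRange 1 (max ms me + 1)) : Int)
      = max (max ms me + 1 - 1) 0 - (List.countP (fun k => decide (1 ≤ k)) (PySem.Set.ofList ks) : Int) := by
    have h1 := pv_countP_not (PySem.List.pyRange 1 (max ms me + 1))
      (fun i => decide ((List.count i ks : Int) = 0))
    have h3 := PySem.List.length_pyRange_one 1 (max ms me + 1)
    rw [← Int.toNat_eq_max]
    omega
  rw [hv, hs, he]
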